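-- pv_equiv track=rewrite | github.com/Katty99/SoftUni | python_oop/first_steps_in_oop/rhombus_of_stars.py | rhombus
-- ===== SOURCE A (Python) =====
-- def rhombus(size):
--     to_print = []
--     for x in range(size):
--         spaces = (size - x - 1) * ' '
--         stars = (x + 1) * '* '
--         to_print.append([spaces, stars])
--     for y in range(size, 1, -1):
--         spaces = (size - y + 1) * ' '
--         stars = (y - 1) * '* '
--         to_print.append([spaces, stars])
--     return "\n".join(["".join(map(str, x)) for x in to_print])
-- ===== SOURCE B (Python) =====
-- def rhombus(size):
--     rows = []
--     for i in range(2 * size - 1):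
--         n = size - abs(size - 1 - i)
--         rows.append((size - n) * ' ' + n * '* ')
--     return "\n".join(rows)
-- ===== Notes on version B (the rewrite author's own statement) =====
-- stated objective: simpler
-- what changed: Replaces the ascending and descending phases and the nested list-of-parts join by a single loop over all 2*size-1 rows whose star count is computed by the symmetric formula size - abs(size-1-i).
import Mathlib
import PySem

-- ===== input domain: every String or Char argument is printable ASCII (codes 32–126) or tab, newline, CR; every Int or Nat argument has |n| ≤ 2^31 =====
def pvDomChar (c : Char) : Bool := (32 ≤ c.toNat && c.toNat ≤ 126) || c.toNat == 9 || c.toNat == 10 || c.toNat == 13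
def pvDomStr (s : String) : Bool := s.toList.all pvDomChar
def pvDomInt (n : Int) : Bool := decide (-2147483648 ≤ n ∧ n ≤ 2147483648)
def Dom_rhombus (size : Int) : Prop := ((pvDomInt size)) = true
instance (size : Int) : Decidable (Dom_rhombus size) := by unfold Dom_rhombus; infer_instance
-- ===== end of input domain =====

-- B replaces A's two sequential phases by one loop whose star count is a symmetric formula (objective: simpler).

-- Python string repetition s * n (n ≤ 0 gives ''), on code points
def pyRepChars (cs : List Char) (n : Int) : List Char := (List.replicate n.toNat cs).flatten

-- ===== PORT A =====
def rhombus (size : Int) : String :=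
  let toPrint : List (List Char) :=
    (PySem.List.pyRange 0 size 1).map (fun x =>
      pyRepChars [' '] (size - x - 1) ++ pyRepChars ['*', ' '] (x + 1))
    ++ (PySem.List.pyRange size 1 (-1)).map (fun y =>
      pyRepChars [' '] (size - y + 1) ++ pyRepChars ['*', ' '] (y - 1))
  String.ofList (PySem.Chars.join ['\n'] toPrint)

-- ===== PORT B =====
def rhombus_alt (size : Int) : String :=
  String.ofList (PySem.Chars.join ['\n']
    ((PySem.List.pyRange 0 (2 * size - 1) 1).map (fun i =>
      let n := size - |size - 1 - i|
      pyRepChars [' '] (size - n) ++ pyRepChars ['*', ' '] n)))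

-- ===== PRECONDITION & SPEC =====
def Spec_rhombus (size : Int) (out : String) : Prop := out = rhombus_alt size
instance (size : Int) (out : String) : Decidable (Spec_rhombus size out) := by unfold Spec_rhombus; infer_instance

-- ===== CLAIM (what is proved, stated in full; the proofs are below) =====
def Claim_equal_rhombus : Prop := ∀ (size : Int), Dom_rhombus size → Spec_rhombus size (rhombus size)

-- ===== LEMMAS AND PROOFS =====

theorem rhombus_rows_eq (size : Int) :
    ((PySem.List.pyRange 0 size 1).map (fun x =>
      pyRepChars [' '] (size - x - 1) ++ pyRepChars ['*', ' '] (x + 1))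
    ++ (PySem.List.pyRange size 1 (-1)).map (fun y =>
      pyRepChars [' '] (size - y + 1) ++ pyRepChars ['*', ' '] (y - 1)))
    = (PySem.List.pyRange 0 (2 * size - 1) 1).map (fun i =>
      pyRepChars [' '] (size - (size - |size - 1 - i|)) ++ pyRepChars ['*', ' '] (size - |size - 1 - i|)) := by
  by_cases h : size ≤ 0
  · rw [PySem.List.pyRange_one_eq_nil (by omega), PySem.List.pyRange_one_eq_nil (by omega),
        PySem.List.pyRange_neg_one_eq_nil (by omega)]
    simp
  · rw [PySem.List.pyRange_one_append 0 size (2 * size - 1) (by omega) (by omega), List.map_append]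
    congr 1
    · apply List.map_congr_left
      intro i hi
      rw [PySem.List.mem_pyRange_one] at hi
      rw [abs_of_nonneg (by omega)]
      congr 2 <;> omega
    · -- reindex both sides over List.range (size-1).toNat
      rw [PySem.List.pyRange_neg_one, PySem.List.pyRange_one, List.map_map, List.map_map]
      have hlen : (size - 1).toNat = (2 * size - 1 - size).toNat := by omega
      rw [hlen]
      apply List.map_congr_left
      intro k hk
      rw [List.mem_range] at hk
      have hk' : (k : Int) < size - 1 := by omega
      simp only [Function.comp]
      rw [abs_of_nonpos (by omega)]
      congr 2 <;> omega

-- ===== VERDICT (by name: the statement is the Claim_ definition above) =====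
theorem rhombus_spec : Claim_equal_rhombus := by
  intro size _
  unfold Spec_rhombus rhombus rhombus_alt
  rw [rhombus_rows_eq]
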